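-- pv_equiv track=rewrite | github.com/Hanjuri/Baekjoon_juri | 백준/Silver/17086. 아기 상어 2/아기 상어 2.py | solution
-- ===== SOURCE A (Python) =====
-- from collections import deque
--
-- def solution(arr):
--   row, col = len(arr), len(arr[0])
--   move = [[0,1],[1,1],[1,0],[1,-1],[0,-1],[-1,-1],[-1,0],[-1,1]]
--
--   def bfs(x,y,count):
--     visited = [[False] * col for _ in range(row)]
--     queue = deque()
--     queue.append((x,y,count))
--     visited[x][y] = True
--     while queue:
--       x, y, count = queue.popleft()
--       if arr[x][y] == 1:
--         return count
--       for dx, dy in move: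
--         nx, ny = x+dx, y+dy
--         if 0 <= nx < row and 0 <= ny < col and not visited[nx][ny]:
--           queue.append((nx,ny,count+1))
--           visited[nx][ny] = True
--     return -1
--
--   max = 0
--   for i in range(row):
--     for j in range(col):
--       if arr[i][j] == 0:
--         result = bfs(i,j,0)
--         if result > max:
--           max = result
--   return max
-- ===== SOURCE B (Python) =====
-- def solution(arr):
--     rows, cols = len(arr), len(arr[0])
--     sharks = [(i, j) for i in range(rows) for j in range(cols) if arr[i][j] == 1]
--     best = 0
--     for i in range(rows):
--         for j in range(cols):
--             if arr[i][j] == 0 and sharks: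
--                 d = min(max(abs(i - x), abs(j - y)) for x, y in sharks)
--                 if d > best:
--                     best = d
--     return best
-- ===== Notes on version B (the rewrite author's own statement) =====
-- stated objective: alternative
-- what changed: Replaces the per-cell breadth-first search over the grid with a direct closed-form computation: collect the shark cells once and take, for each empty cell, the minimum Chebyshev distance to a shark (BFS distance on a full 8-connected rectangle equals Chebyshev distance), maximised over empty cells.
import Mathlib
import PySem

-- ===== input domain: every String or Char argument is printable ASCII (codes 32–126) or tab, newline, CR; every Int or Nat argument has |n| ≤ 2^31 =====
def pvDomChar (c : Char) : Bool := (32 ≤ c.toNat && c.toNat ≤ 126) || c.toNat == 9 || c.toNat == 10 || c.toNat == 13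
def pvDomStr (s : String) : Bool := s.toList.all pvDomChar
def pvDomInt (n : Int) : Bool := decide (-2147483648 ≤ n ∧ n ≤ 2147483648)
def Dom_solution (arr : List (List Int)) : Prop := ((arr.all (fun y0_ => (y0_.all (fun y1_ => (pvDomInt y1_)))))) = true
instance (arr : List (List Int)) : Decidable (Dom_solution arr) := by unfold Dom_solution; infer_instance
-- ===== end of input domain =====

-- B replaces A's per-empty-cell breadth-first search by a direct minimum-Chebyshev-distance computation
-- over the shark cells collected once (on a full 8-connected rectangle BFS distance IS Chebyshev distance);
-- objective: alternative algorithm (no queue, no visited matrix).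

-- ===== PORT A =====
-- grid access arr[x][y]: every access A performs is in range under Pre_solution, so the defaults are never read there
def get2 (arr : List (List Int)) (x y : Int) : Int :=
  ((PySem.List.pyGet? ((PySem.List.pyGet? arr x).getD []) y)).getD 0

def moves : List (Int × Int) := [(0,1),(1,1),(1,0),(1,-1),(0,-1),(-1,-1),(-1,0),(-1,1)]

-- visited[x][y]; reads `true` for a physically absent cell (A only ever reads guarded in-range cells)
def vget (v : List (List Bool)) (x y : Int) : Bool :=
  ((PySem.List.pyGet? ((PySem.List.pyGet? v x).getD []) y)).getD true

def vset (v : List (List Bool)) (x y : Int) : List (List Bool) :=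
  v.modify x.toNat (fun r => r.set y.toNat true)

-- termination measure helpers for the while-loop
def unvis (v : List (List Bool)) : Nat :=
  (v.map (fun r => r.countP (fun b => !b))).sum

theorem countP_set_true_lt (a : List Bool) (j : Nat) (h : a[j]? = some false) :
    (a.set j true).countP (fun b => !b) < a.countP (fun b => !b) := by
  induction a generalizing j with
  | nil => simp at h
  | cons b t ih =>
    cases j with
    | zero => simp_all
    | succ j =>
      simp only [List.getElem?_cons_succ] at h
      have := ih j h
      simp [List.countP_cons]
      omega

theorem vget_natCast (v : List (List Bool)) (i j : Nat) :
    vget v (i : Int) (j : Int) = ((v[i]?.getD [])[j]?).getD true := by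
  simp [vget, PySem.List.pyGet?_natCast]

theorem unvis_modify_lt (i j : Nat) :
    ∀ (v : List (List Bool)) (r : List Bool), v[i]? = some r → r[j]? = some false →
      unvis (v.modify i (fun row => row.set j true)) < unvis v := by
  induction i with
  | zero =>
    intro v r h1 h2
    cases v with
    | nil => simp at h1
    | cons a t =>
      simp only [List.getElem?_cons_zero, Option.some.injEq] at h1
      subst h1
      simp [unvis, List.modify]
      have := countP_set_true_lt _ j h2
      omega
  | succ i ih =>
    intro v r h1 h2
    cases v with
    | nil => simp at h1
    | cons a t =>
      simp only [List.getElem?_cons_succ] at h1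
      have := ih t r h1 h2
      simp [unvis, List.modify] at this ⊢
      omega

theorem unvis_vset_lt (v : List (List Bool)) (x y : Int) (hx : 0 ≤ x) (hy : 0 ≤ y)
    (h : vget v x y = false) : unvis (vset v x y) < unvis v := by
  obtain ⟨i, rfl⟩ : ∃ i : Nat, x = (i : Int) := ⟨x.toNat, (Int.toNat_of_nonneg hx).symm⟩
  obtain ⟨j, rfl⟩ : ∃ j : Nat, y = (j : Int) := ⟨y.toNat, (Int.toNat_of_nonneg hy).symm⟩
  rw [vget_natCast] at h
  obtain ⟨r, hr⟩ : ∃ r, v[i]? = some r := by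
    cases hv : v[i]? with
    | none => rw [hv] at h; simp at h
    | some r => exact ⟨r, rfl⟩
  rw [hr] at h
  simp only [Option.getD_some] at h
  obtain hb : r[j]? = some false := by
    cases hb : r[j]? with
    | none => rw [hb] at h; simp at h
    | some b => rw [hb] at h; simp at h; simp [h]
  have := unvis_modify_lt i j v r hr hb
  simpa [vset] using this

-- the inner `for dx, dy in move` loop of A's bfs
def expand (row col x y c : Int) (ms : List (Int × Int))
    (v : List (List Bool)) (q : List (Int × Int × Int)) :
    List (List Bool) × List (Int × Int × Int) :=
  match ms with
  | [] => (v, q)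
  | (dx, dy) :: ms' =>
    let nx := x + dx
    let ny := y + dy
    if 0 ≤ nx ∧ nx < row ∧ 0 ≤ ny ∧ ny < col ∧ vget v nx ny = false then
      expand row col x y c ms' (vset v nx ny) (q ++ [(nx, ny, c + 1)])
    else
      expand row col x y c ms' v q

theorem expand_measure (row col x y c : Int) (ms : List (Int × Int))
    (v : List (List Bool)) (q : List (Int × Int × Int)) :
    2 * unvis (expand row col x y c ms v q).1 + (expand row col x y c ms v q).2.length ≤
      2 * unvis v + q.length := by
  induction ms generalizing v q with
  | nil => simp [expand]
  | cons m ms' ih =>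
    obtain ⟨dx, dy⟩ := m
    rw [expand]
    split
    · rename_i hc
      have h1 := unvis_vset_lt v (x + dx) (y + dy) hc.1 hc.2.2.1 hc.2.2.2.2
      have h2 := ih (vset v (x + dx) (y + dy)) (q ++ [(x + dx, y + dy, c + 1)])
      simp only [List.length_append, List.length_cons, List.length_nil] at h2 ⊢
      omega
    · exact ih v q

-- the `while queue` loop of A's bfs
def bfsLoop (arr : List (List Int)) (row col : Int)
    (v : List (List Bool)) (q : List (Int × Int × Int)) : Int :=
  match q with
  | [] => -1
  | (x, y, c) :: rest =>
    if get2 arr x y = 1 then c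
    else
      let st := expand row col x y c moves v rest
      bfsLoop arr row col st.1 st.2
termination_by 2 * unvis v + q.length
decreasing_by
  have := expand_measure row col x y c moves v rest
  simp only [List.length_cons]
  omega

def bfs (arr : List (List Int)) (row col x y c : Int) : Int :=
  bfsLoop arr row col
    (vset (List.replicate row.toNat (List.replicate col.toNat false)) x y)
    [(x, y, c)]

def solution (arr : List (List Int)) : Int :=
  let row : Int := arr.length
  let col : Int := arr.headI.length
  (PySem.List.pyRange 0 row 1).foldl (fun mx i =>
    (PySem.List.pyRange 0 col 1).foldl (fun mx j =>
      if get2 arr i j = 0 then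
        let result := bfs arr row col i j 0
        if mx < result then result else mx
      else mx) mx) 0

-- ===== PORT B =====
def cheb (a b : Int × Int) : Int := max |a.1 - b.1| |a.2 - b.2|

def sharkCells (arr : List (List Int)) (rows cols : Int) : List (Int × Int) :=
  (PySem.List.pyRange 0 rows 1).flatMap (fun i =>
    ((PySem.List.pyRange 0 cols 1).filter (fun j => get2 arr i j = 1)).map (fun j => (i, j)))

def solution_alt (arr : List (List Int)) : Int :=
  let rows : Int := arr.length
  let cols : Int := arr.headI.length
  let sharks := sharkCells arr rows cols
  (PySem.List.pyRange 0 rows 1).foldl (fun best i =>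
    (PySem.List.pyRange 0 cols 1).foldl (fun best j =>
      if get2 arr i j = 0 ∧ sharks ≠ [] then
        let d := (PySem.List.min? (sharks.map (fun t => cheb (i, j) t)) (fun z => z)).getD 0
        if best < d then d else best
      else best) best) 0

-- ===== PRECONDITION & SPEC =====
-- Pre_ excludes exactly the inputs where the Python A raises: the empty grid (len(arr[0]) IndexError)
-- and grids in which some row is shorter than row 0 (arr[i][j] IndexError for j < len(arr[0])).
def Pre_solution (arr : List (List Int)) : Prop :=
  arr ≠ [] ∧ ∀ r ∈ arr, arr.headI.length ≤ r.length
instance (arr : List (List Int)) : Decidable (Pre_solution arr) := by unfold Pre_solution; infer_instance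

def pvWitness_solution : List (List Int) := [[0, 1], [0, 0]]

def Spec_solution (arr : List (List Int)) (out : Int) : Prop := out = solution_alt arr
instance (arr : List (List Int)) (out : Int) : Decidable (Spec_solution arr out) := by unfold Spec_solution; infer_instance

-- ===== CLAIM (what is proved, stated in full; the proofs are below) =====
def Claim_equal_solution : Prop := ∀ (arr : List (List Int)), Dom_solution arr → Pre_solution arr → Spec_solution arr (solution arr)

-- ===== LEMMAS AND PROOFS =====

-- ---- geometry of the Chebyshev metric ----
def inGrid (row col : Int) (c : Int × Int) : Prop :=
  0 ≤ c.1 ∧ c.1 < row ∧ 0 ≤ c.2 ∧ c.2 < col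

def nbr (c m : Int × Int) : Int × Int := (c.1 + m.1, c.2 + m.2)

theorem cheb_bounds (a b : Int × Int) :
    (a.1 - b.1 ≤ cheb a b ∧ b.1 - a.1 ≤ cheb a b ∧ a.2 - b.2 ≤ cheb a b ∧ b.2 - a.2 ≤ cheb a b) ∧
      (cheb a b = a.1 - b.1 ∨ cheb a b = b.1 - a.1 ∨ cheb a b = a.2 - b.2 ∨ cheb a b = b.2 - a.2) := by
  unfold cheb
  rcases max_cases |a.1 - b.1| |a.2 - b.2| with ⟨h1, h2⟩ | ⟨h1, h2⟩ <;>
    rcases abs_cases (a.1 - b.1) with ⟨p1, p2⟩ | ⟨p1, p2⟩ <;>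
      rcases abs_cases (a.2 - b.2) with ⟨q1, q2⟩ | ⟨q1, q2⟩ <;> omega

theorem cheb_self (a : Int × Int) : cheb a a = 0 := by
  have := cheb_bounds a a; omega

theorem cheb_nonneg (a b : Int × Int) : 0 ≤ cheb a b := by
  have := cheb_bounds a b; omega

theorem cheb_pos_of_ne {a b : Int × Int} (h : a ≠ b) : 1 ≤ cheb a b := by
  have hb := cheb_bounds a b
  rcases eq_or_ne a.1 b.1 with h1 | h1
  · rcases eq_or_ne a.2 b.2 with h2 | h2
    · exact absurd (Prod.ext h1 h2) h
    · omega
  · omega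

theorem cheb_triangle (a b c : Int × Int) : cheb a c ≤ cheb a b + cheb b c := by
  have h1 := cheb_bounds a b
  have h2 := cheb_bounds b c
  have h3 := cheb_bounds a c
  omega

theorem cheb_nbr_le {m : Int × Int} (hm : m ∈ moves) (c : Int × Int) : cheb c (nbr c m) ≤ 1 := by
  have hb := cheb_bounds c (nbr c m)
  simp only [moves, List.mem_cons, List.not_mem_nil, or_false] at hm
  rcases hm with h | h | h | h | h | h | h | h <;> subst h <;> simp only [nbr] at hb ⊢ <;> omega

theorem step_toward {row col : Int} {a b : Int × Int} (ha : inGrid row col a)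
    (hb : inGrid row col b) (hne : a ≠ b) :
    ∃ m ∈ moves, inGrid row col (nbr a m) ∧ cheb (nbr a m) b = cheb a b - 1 := by
  obtain ⟨ha1, ha2, ha3, ha4⟩ := ha
  obtain ⟨hb1, hb2, hb3, hb4⟩ := hb
  have hB := cheb_bounds a b
  rcases lt_trichotomy a.1 b.1 with h1 | h1 | h1 <;>
    rcases lt_trichotomy a.2 b.2 with h2 | h2 | h2
  · exact ⟨(1, 1), by decide, by simp only [inGrid, nbr]; omega,
      by have hB2 := cheb_bounds (nbr a (1, 1)) b; simp only [nbr] at hB2 ⊢; omega⟩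
  · exact ⟨(1, 0), by decide, by simp only [inGrid, nbr]; omega,
      by have hB2 := cheb_bounds (nbr a (1, 0)) b; simp only [nbr] at hB2 ⊢; omega⟩
  · exact ⟨(1, -1), by decide, by simp only [inGrid, nbr]; omega,
      by have hB2 := cheb_bounds (nbr a (1, -1)) b; simp only [nbr] at hB2 ⊢; omega⟩
  · exact ⟨(0, 1), by decide, by simp only [inGrid, nbr]; omega,
      by have hB2 := cheb_bounds (nbr a (0, 1)) b; simp only [nbr] at hB2 ⊢; omega⟩
  · exact absurd (Prod.ext h1 h2) hne
  · exact ⟨(0, -1), by decide, by simp only [inGrid, nbr]; omega,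
      by have hB2 := cheb_bounds (nbr a (0, -1)) b; simp only [nbr] at hB2 ⊢; omega⟩
  · exact ⟨(-1, 1), by decide, by simp only [inGrid, nbr]; omega,
      by have hB2 := cheb_bounds (nbr a (-1, 1)) b; simp only [nbr] at hB2 ⊢; omega⟩
  · exact ⟨(-1, 0), by decide, by simp only [inGrid, nbr]; omega,
      by have hB2 := cheb_bounds (nbr a (-1, 0)) b; simp only [nbr] at hB2 ⊢; omega⟩
  · exact ⟨(-1, -1), by decide, by simp only [inGrid, nbr]; omega,
      by have hB2 := cheb_bounds (nbr a (-1, -1)) b; simp only [nbr] at hB2 ⊢; omega⟩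

-- ---- the visited matrix ----
theorem vget_vset_self (v : List (List Bool)) (x y : Int) (hx : 0 ≤ x) (hy : 0 ≤ y) :
    vget (vset v x y) x y = true := by
  obtain ⟨i, rfl⟩ : ∃ i : Nat, x = (i : Int) := ⟨x.toNat, (Int.toNat_of_nonneg hx).symm⟩
  obtain ⟨j, rfl⟩ : ∃ j : Nat, y = (j : Int) := ⟨y.toNat, (Int.toNat_of_nonneg hy).symm⟩
  rw [vget_natCast]
  simp only [vset, Int.toNat_natCast, List.getElem?_modify]
  cases hv : v[i]? with
  | none => simp
  | some r =>
    simp [List.getElem?_set]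
    split <;> simp

theorem vget_vset_of_ne (v : List (List Bool)) {x y a b : Int} (hx : 0 ≤ x) (hy : 0 ≤ y)
    (ha : 0 ≤ a) (hbb : 0 ≤ b) (hne : (a, b) ≠ (x, y)) :
    vget (vset v x y) a b = vget v a b := by
  obtain ⟨i, rfl⟩ : ∃ i : Nat, x = (i : Int) := ⟨x.toNat, (Int.toNat_of_nonneg hx).symm⟩
  obtain ⟨j, rfl⟩ : ∃ j : Nat, y = (j : Int) := ⟨y.toNat, (Int.toNat_of_nonneg hy).symm⟩
  obtain ⟨a', rfl⟩ : ∃ a' : Nat, a = (a' : Int) := ⟨a.toNat, (Int.toNat_of_nonneg ha).symm⟩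
  obtain ⟨b', rfl⟩ : ∃ b' : Nat, b = (b' : Int) := ⟨b.toNat, (Int.toNat_of_nonneg hbb).symm⟩
  have hne' : a' ≠ i ∨ b' ≠ j := by
    rcases eq_or_ne a' i with h1 | h1
    · subst h1
      exact Or.inr fun h2 => hne (by simp [h2])
    · exact Or.inl h1
  rw [vget_natCast, vget_natCast]
  simp only [vset, Int.toNat_natCast, List.getElem?_modify]
  rcases hne' with h | h
  · cases hv : v[a']? with
    | none => simp
    | some r => simp [Ne.symm h]
  · cases hv : v[a']? with
    | none => simp
    | some r =>
      by_cases hia : i = a'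
      · subst hia
        simp [Ne.symm h]
      · simp [hia]

theorem vget_vset_mono (v : List (List Bool)) {x y a b : Int} (hx : 0 ≤ x) (hy : 0 ≤ y)
    (ha : 0 ≤ a) (hbb : 0 ≤ b) (h : vget v a b = true) :
    vget (vset v x y) a b = true := by
  by_cases hne : (a, b) = (x, y)
  · obtain ⟨h1, h2⟩ := Prod.mk.injEq .. ▸ hne
    subst h1; subst h2
    exact vget_vset_self v a b ha hbb
  · rw [vget_vset_of_ne v hx hy ha hbb hne]; exact h

theorem vget_blank {row col : Int} {c : Int × Int} (h : inGrid row col c) :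
    vget (List.replicate row.toNat (List.replicate col.toNat false)) c.1 c.2 = false := by
  obtain ⟨h1, h2, h3, h4⟩ := h
  obtain ⟨i, hi⟩ : ∃ i : Nat, c.1 = (i : Int) := ⟨(c.1).toNat, (Int.toNat_of_nonneg h1).symm⟩
  obtain ⟨j, hj⟩ : ∃ j : Nat, c.2 = (j : Int) := ⟨(c.2).toNat, (Int.toNat_of_nonneg h3).symm⟩
  rw [hi, hj, vget_natCast]
  rw [List.getElem?_replicate, if_pos (by omega), Option.getD_some,
    List.getElem?_replicate, if_pos (by omega), Option.getD_some]

-- ---- the BFS invariant ----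
structure BfsInv (arr : List (List Int)) (row col : Int) (s : Int × Int)
    (v : List (List Bool)) (q : List (Int × Int × Int)) : Prop where
  ent : ∀ e ∈ q, inGrid row col (e.1, e.2.1) ∧ e.2.2 = cheb s (e.1, e.2.1) ∧
          vget v e.1 e.2.1 = true
  ord : q.Pairwise (fun e e' => e.2.2 ≤ e'.2.2)
  bnd : ∀ e0 ∈ q.head?, ∀ e ∈ q, e.2.2 ≤ e0.2.2 + 1
  deq : ∀ c : Int × Int, inGrid row col c → vget v c.1 c.2 = true →
          c ∉ q.map (fun e => ((e.1, e.2.1) : Int × Int)) →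
          get2 arr c.1 c.2 ≠ 1 ∧
            ∀ m ∈ moves, inGrid row col (nbr c m) → vget v (nbr c m).1 (nbr c m).2 = true
  reach : ∀ u : Int × Int, inGrid row col u → vget v u.1 u.2 = false →
          ∃ c : Int × Int, inGrid row col c ∧ vget v c.1 c.2 = true ∧
            cheb s c + cheb c u = cheb s u

theorem queue_witness {arr : List (List Int)} {row col : Int} {s : Int × Int}
    {v : List (List Bool)} {q : List (Int × Int × Int)} (hInv : BfsInv arr row col s v q) :
    ∀ n : Nat, ∀ c u : Int × Int, (cheb c u).toNat = n → inGrid row col c →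
      vget v c.1 c.2 = true → inGrid row col u → vget v u.1 u.2 = false →
      cheb s c + cheb c u = cheb s u →
      ∃ e ∈ q, e.2.2 + cheb (e.1, e.2.1) u = cheb s u := by
  intro n
  induction n using Nat.strong_induction_on with
  | _ n ih =>
    intro c u hn hc hcv hu huv heq
    by_cases hq : c ∈ q.map (fun e => ((e.1, e.2.1) : Int × Int))
    · obtain ⟨e, he, hee⟩ := List.mem_map.1 hq
      refine ⟨e, he, ?_⟩
      have h2 := (hInv.ent e he).2.1
      have hee' : ((e.1, e.2.1) : Int × Int) = c := hee
      rw [h2, hee']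
      exact heq
    · have hd := hInv.deq c hc hcv hq
      have hne : c ≠ u := by
        intro h
        rw [h, huv] at hcv
        cases hcv
      obtain ⟨m, hm, hmg, hmc⟩ := step_toward hc hu hne
      have hc'v : vget v (nbr c m).1 (nbr c m).2 = true := hd.2 m hm hmg
      have hd1 : 1 ≤ cheb c u := cheb_pos_of_ne hne
      have hnb := cheb_nbr_le hm c
      have ht1 := cheb_triangle s c (nbr c m)
      have ht2 := cheb_triangle s (nbr c m) u
      have heq' : cheb s (nbr c m) + cheb (nbr c m) u = cheb s u := by omega
      have hn' : (cheb (nbr c m) u).toNat < n := by omega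
      exact ih _ hn' (nbr c m) u rfl hmg hc'v hu huv heq'

theorem exists_queue_witness {arr : List (List Int)} {row col : Int} {s : Int × Int}
    {v : List (List Bool)} {q : List (Int × Int × Int)} (hInv : BfsInv arr row col s v q)
    {u : Int × Int} (hu : inGrid row col u) (huv : vget v u.1 u.2 = false) :
    ∃ e ∈ q, e.2.2 + cheb (e.1, e.2.1) u = cheb s u := by
  obtain ⟨c, hc1, hc2, hc3⟩ := hInv.reach u hu huv
  exact queue_witness hInv (cheb c u).toNat c u rfl hc1 hc2 hu huv hc3

-- ---- characterisation of expand ----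
set_option maxHeartbeats 2000000 in
theorem expand_spec (row col x y k : Int) (hx : 0 ≤ x) (hy : 0 ≤ y) :
    ∀ ms : List (Int × Int), (∀ m ∈ ms, m ∈ moves) →
    ∀ v q, ∃ extra,
      (expand row col x y k ms v q).2 = q ++ extra ∧
      (∀ a b : Int, 0 ≤ a → 0 ≤ b → vget v a b = true →
        vget (expand row col x y k ms v q).1 a b = true) ∧
      (∀ a b : Int, 0 ≤ a → 0 ≤ b → vget (expand row col x y k ms v q).1 a b = true →
        vget v a b = true ∨ ∃ e ∈ extra, (e.1, e.2.1) = ((a, b) : Int × Int)) ∧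
      (∀ e ∈ extra, e.2.2 = k + 1 ∧ (∃ m ∈ ms, ((e.1, e.2.1) : Int × Int) = nbr (x, y) m) ∧
        inGrid row col (e.1, e.2.1) ∧ vget v e.1 e.2.1 = false ∧
        vget (expand row col x y k ms v q).1 e.1 e.2.1 = true) ∧
      (∀ m ∈ ms, inGrid row col (nbr (x, y) m) →
        vget (expand row col x y k ms v q).1 (nbr (x, y) m).1 (nbr (x, y) m).2 = true) := by
  intro ms
  induction ms with
  | nil =>
    intro _ v q
    refine ⟨[], by simp [expand], fun a b _ _ h => h, fun a b _ _ h => Or.inl h, by simp, by simp⟩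
  | cons m0 ms' ih =>
    obtain ⟨dx, dy⟩ := m0
    intro hmoves v q
    have hms' : ∀ m ∈ ms', m ∈ moves := fun m hm => hmoves m (List.mem_cons_of_mem _ hm)
    simp only [expand]
    by_cases hg : 0 ≤ x + dx ∧ x + dx < row ∧ 0 ≤ y + dy ∧ y + dy < col ∧
        vget v (x + dx) (y + dy) = false
    · rw [if_pos hg]
      obtain ⟨hg1, hg2, hg3, hg4, hg5⟩ := hg
      obtain ⟨extra', he1, he2, he3, he4, he5⟩ :=
        ih hms' (vset v (x + dx) (y + dy)) (q ++ [(x + dx, y + dy, k + 1)])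
      refine ⟨(x + dx, y + dy, k + 1) :: extra', ?_, ?_, ?_, ?_, ?_⟩
      · rw [he1, List.append_assoc]; rfl
      · intro a b ha hb hv
        exact he2 a b ha hb (vget_vset_mono v hg1 hg3 ha hb hv)
      · intro a b ha hb hv
        rcases he3 a b ha hb hv with h | ⟨e, he, hee⟩
        · by_cases hab : ((a, b) : Int × Int) = (x + dx, y + dy)
          · exact Or.inr ⟨(x + dx, y + dy, k + 1), List.mem_cons_self, hab.symm⟩
          · rw [vget_vset_of_ne v hg1 hg3 ha hb hab] at h
            exact Or.inl h
        · exact Or.inr ⟨e, List.mem_cons_of_mem _ he, hee⟩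
      · intro e he
        rcases List.mem_cons.1 he with rfl | he'
        · refine ⟨rfl, ⟨(dx, dy), List.mem_cons_self, rfl⟩, ⟨hg1, hg2, hg3, hg4⟩, hg5, ?_⟩
          exact he2 _ _ hg1 hg3 (vget_vset_self v _ _ hg1 hg3)
        · obtain ⟨p1, ⟨m, hm, hmn⟩, p3, p4, p5⟩ := he4 e he'
          refine ⟨p1, ⟨m, List.mem_cons_of_mem _ hm, hmn⟩, p3, ?_, p5⟩
          by_contra hvt
          have hvt' : vget v e.1 e.2.1 = true := by
            cases h : vget v e.1 e.2.1
            · exact absurd h hvt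
            · rfl
          have := vget_vset_mono v hg1 hg3 p3.1 p3.2.2.1 hvt'
          rw [this] at p4
          cases p4
      · intro m hm hmg
        rcases List.mem_cons.1 hm with rfl | hm'
        · have h1 : vget (vset v (x + dx) (y + dy)) (x + dx) (y + dy) = true :=
            vget_vset_self v _ _ hg1 hg3
          have h2 := he2 (x + dx) (y + dy) hg1 hg3 h1
          simpa only [nbr] using h2
        · exact he5 m hm' hmg
    · rw [if_neg hg]
      obtain ⟨extra, he1, he2, he3, he4, he5⟩ := ih hms' v q
      refine ⟨extra, he1, he2, he3, ?_, ?_⟩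
      · intro e he
        obtain ⟨p1, ⟨m, hm, hmn⟩, p3, p4, p5⟩ := he4 e he
        exact ⟨p1, ⟨m, List.mem_cons_of_mem _ hm, hmn⟩, p3, p4, p5⟩
      · intro m hm hmg
        rcases List.mem_cons.1 hm with rfl | hm'
        · obtain ⟨q1, q2, q3, q4⟩ := hmg
          simp only [nbr] at q1 q2 q3 q4 ⊢
          have hvt : vget v (x + dx) (y + dy) = true := by
            cases h : vget v (x + dx) (y + dy)
            · exact absurd ⟨q1, q2, q3, q4, h⟩ hg
            · rfl
          exact he2 _ _ q1 q3 hvt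
        · exact he5 m hm' hmg

-- ---- shark cells and their minimum ----
theorem mem_sharkCells {arr : List (List Int)} {row col : Int} {u : Int × Int} :
    u ∈ sharkCells arr row col ↔ inGrid row col u ∧ get2 arr u.1 u.2 = 1 := by
  simp only [sharkCells, List.mem_flatMap, List.mem_map, List.mem_filter,
    PySem.List.mem_pyRange_one, decide_eq_true_eq, inGrid]
  constructor
  · rintro ⟨i, ⟨hi0, hi1⟩, j, ⟨⟨hj0, hj1⟩, hj2⟩, rfl⟩
    exact ⟨⟨hi0, hi1, hj0, hj1⟩, hj2⟩
  · rintro ⟨⟨h1, h2, h3, h4⟩, h5⟩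
    exact ⟨u.1, ⟨h1, h2⟩, u.2, ⟨⟨h3, h4⟩, h5⟩, rfl⟩

-- ---- the main loop theorem ----
theorem head_min {q : List (Int × Int × Int)}
    (hord : q.Pairwise (fun e e' => e.2.2 ≤ e'.2.2)) {e0 : Int × Int × Int}
    (h0 : q.head? = some e0) : ∀ e ∈ q, e0.2.2 ≤ e.2.2 := by
  cases q with
  | nil => cases h0
  | cons hd rest =>
    rw [List.head?_cons] at h0
    obtain rfl := Option.some.inj h0
    intro e he
    rcases List.mem_cons.1 he with rfl | he'
    · exact le_rfl
    · exact (List.pairwise_cons.1 hord).1 e he'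

theorem inv_step {arr : List (List Int)} {row col : Int} {s : Int × Int}
    {v : List (List Bool)} {x y c : Int} {rest : List (Int × Int × Int)}
    (hInv : BfsInv arr row col s v ((x, y, c) :: rest)) (hnot : get2 arr x y ≠ 1) :
    BfsInv arr row col s (expand row col x y c moves v rest).1
      (expand row col x y c moves v rest).2 := by
  obtain ⟨hgxy, hcval, hvxy⟩ := hInv.ent (x, y, c) List.mem_cons_self
  have hcval' : c = cheb s ((x, y) : Int × Int) := hcval
  have hx : 0 ≤ x := hgxy.1
  have hy : 0 ≤ y := hgxy.2.2.1
  obtain ⟨extra, he1, he2, he3, he4, he5⟩ :=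
    expand_spec row col x y c hx hy moves (fun m hm => hm) v rest
  have hhead : ∀ e ∈ (x, y, c) :: rest, c ≤ e.2.2 :=
    head_min hInv.ord (e0 := (x, y, c)) rfl
  have hub : ∀ e ∈ (x, y, c) :: rest, e.2.2 ≤ c + 1 :=
    hInv.bnd (x, y, c) (by rw [List.head?_cons]; rfl)
  have hextra : ∀ e ∈ extra, cheb s ((e.1, e.2.1) : Int × Int) = c + 1 := by
    intro e he
    obtain ⟨p1, ⟨m, hm, hmn⟩, p3, p4, p5⟩ := he4 e he
    have hup : cheb s ((e.1, e.2.1) : Int × Int) ≤ c + 1 := by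
      have h1 := cheb_triangle s (x, y) (e.1, e.2.1)
      have h2 := cheb_nbr_le hm (x, y)
      have h3 : cheb (x, y) ((e.1, e.2.1) : Int × Int) ≤ 1 := by rw [hmn]; exact h2
      omega
    have hlow : c + 1 ≤ cheb s ((e.1, e.2.1) : Int × Int) := by
      obtain ⟨e', he', heq'⟩ := exists_queue_witness hInv p3 p4
      have h1 : c ≤ e'.2.2 := hhead e' he'
      have h2 : (1 : Int) ≤ cheb (e'.1, e'.2.1) (e.1, e.2.1) := by
        apply cheb_pos_of_ne
        intro hcontra
        have hv' := (hInv.ent e' he').2.2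
        have hc1 : e'.1 = e.1 := (Prod.ext_iff.1 hcontra).1
        have hc2 : e'.2.1 = e.2.1 := (Prod.ext_iff.1 hcontra).2
        rw [hc1, hc2] at hv'
        rw [hv'] at p4
        cases p4
      omega
    omega
  constructor
  · rw [he1]
    intro e he
    rcases List.mem_append.1 he with h | h
    · obtain ⟨g1, g2, g3⟩ := hInv.ent e (List.mem_cons_of_mem _ h)
      exact ⟨g1, g2, he2 _ _ g1.1 g1.2.2.1 g3⟩
    · obtain ⟨p1, _, p3, _, p5⟩ := he4 e h
      exact ⟨p3, by rw [p1, hextra e h], p5⟩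
  · rw [he1]
    refine List.pairwise_append.2 ⟨(List.pairwise_cons.1 hInv.ord).2, ?_, ?_⟩
    · refine List.pairwise_of_forall_mem_list ?_
      intro a ha b hb
      have h1 := (he4 a ha).1
      have h2 := (he4 b hb).1
      omega
    · intro a ha b hb
      have h1 := hub a (List.mem_cons_of_mem _ ha)
      have h2 := (he4 b hb).1
      omega
  · rw [he1]
    intro e0 he0 e he
    have he0m : e0 ∈ rest ++ extra := List.mem_of_mem_head? he0
    have l1 : c ≤ e0.2.2 := by
      rcases List.mem_append.1 he0m with h | h
      · exact hhead e0 (List.mem_cons_of_mem _ h)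
      · have := (he4 e0 h).1; omega
    have l2 : e.2.2 ≤ c + 1 := by
      rcases List.mem_append.1 he with h | h
      · exact hub e (List.mem_cons_of_mem _ h)
      · have := (he4 e h).1; omega
    omega
  · intro c0 hc0g hc0v hc0q
    rw [he1] at hc0q
    have ha := hc0g.1
    have hb2 := hc0g.2.2.1
    rcases he3 c0.1 c0.2 ha hb2 hc0v with hold | ⟨e, he, hee⟩
    · by_cases hxy : c0 = (x, y)
      · subst hxy
        exact ⟨hnot, fun m hm hmg => he5 m hm hmg⟩
      · have hnq : c0 ∉ ((x, y, c) :: rest).map (fun e => ((e.1, e.2.1) : Int × Int)) := by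
          intro hmem
          rcases List.mem_map.1 hmem with ⟨e', he', hee'⟩
          have hee'' : ((e'.1, e'.2.1) : Int × Int) = c0 := hee'
          rcases List.mem_cons.1 he' with rfl | he''2
          · exact hxy hee''.symm
          · exact hc0q (List.mem_map.2 ⟨e', List.mem_append_left _ he''2, hee'⟩)
        obtain ⟨g1, g2⟩ := hInv.deq c0 hc0g hold hnq
        exact ⟨g1, fun m hm hmg => he2 _ _ hmg.1 hmg.2.2.1 (g2 m hm hmg)⟩
    · exact absurd (List.mem_map.2 ⟨e, List.mem_append_right _ he, hee⟩) hc0q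
  · intro u hu huv'
    have huv : vget v u.1 u.2 = false := by
      cases hvv : vget v u.1 u.2
      · rfl
      · rw [he2 u.1 u.2 hu.1 hu.2.2.1 hvv] at huv'
        cases huv'
    obtain ⟨cw, q1, q2, q3⟩ := hInv.reach u hu huv
    exact ⟨cw, q1, he2 _ _ q1.1 q1.2.2.1 q2, q3⟩

set_option maxHeartbeats 1000000 in
theorem bfsLoop_eq (arr : List (List Int)) (row col : Int) (s : Int × Int) :
    ∀ v q, BfsInv arr row col s v q →
    bfsLoop arr row col v q =
      (PySem.List.min? ((sharkCells arr row col).map (fun t => cheb s t)) (fun z => z)).getD (-1) := by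
  suffices H : ∀ (N : Nat) (v : List (List Bool)) (q : List (Int × Int × Int)),
      2 * unvis v + q.length ≤ N → BfsInv arr row col s v q →
      bfsLoop arr row col v q =
        (PySem.List.min? ((sharkCells arr row col).map (fun t => cheb s t)) (fun z => z)).getD (-1) by
    exact fun v q h => H (2 * unvis v + q.length) v q le_rfl h
  intro N
  induction N with
  | zero =>
    intro v q hm hInv
    have hq : q = [] := by
      cases q with
      | nil => rfl
      | cons a l => simp at hm
    subst hq
    rw [bfsLoop]
    have hempty : sharkCells arr row col = [] := by
      rw [List.eq_nil_iff_forall_not_mem]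
      intro u hu
      obtain ⟨hug, hu1⟩ := mem_sharkCells.1 hu
      cases hv : vget v u.1 u.2
      · obtain ⟨e, he, _⟩ := exists_queue_witness hInv hug hv
        simp at he
      · exact (hInv.deq u hug hv (by simp)).1 hu1
    rw [hempty, List.map_nil, (PySem.List.min?_eq_none_iff _ _).2 rfl]
    rfl
  | succ N ihN =>
    intro v q hm hInv
    cases q with
    | nil =>
      rw [bfsLoop]
      have hempty : sharkCells arr row col = [] := by
        rw [List.eq_nil_iff_forall_not_mem]
        intro u hu
        obtain ⟨hug, hu1⟩ := mem_sharkCells.1 hu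
        cases hv : vget v u.1 u.2
        · obtain ⟨e, he, _⟩ := exists_queue_witness hInv hug hv
          simp at he
        · exact (hInv.deq u hug hv (by simp)).1 hu1
      rw [hempty, List.map_nil, (PySem.List.min?_eq_none_iff _ _).2 rfl]
      rfl
    | cons hd rest =>
      obtain ⟨x, y, c⟩ := hd
      rw [bfsLoop]
      by_cases h1 : get2 arr x y = 1
      · rw [if_pos h1]
        have hhd := hInv.ent (x, y, c) List.mem_cons_self
        have hgxy : inGrid row col ((x, y) : Int × Int) := hhd.1
        have hcv : c = cheb s ((x, y) : Int × Int) := hhd.2.1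
        have hu0 : ((x, y) : Int × Int) ∈ sharkCells arr row col := mem_sharkCells.2 ⟨hgxy, h1⟩
        obtain ⟨m, hm2⟩ : ∃ m, PySem.List.min?
            ((sharkCells arr row col).map (fun t => cheb s t)) (fun z => z) = some m := by
          cases hmm : PySem.List.min? ((sharkCells arr row col).map (fun t => cheb s t))
              (fun z => z) with
          | none =>
            have := (PySem.List.min?_eq_none_iff _ _).1 hmm
            rw [List.map_eq_nil_iff] at this
            rw [this] at hu0
            cases hu0
          | some m => exact ⟨m, rfl⟩
        rw [hm2, Option.getD_some]
        have hle1 : m ≤ cheb s ((x, y) : Int × Int) :=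
          PySem.List.min?_isMin hm2 _ (List.mem_map.2 ⟨(x, y), hu0, rfl⟩)
        have hle2 : c ≤ m := by
          have hmmem := PySem.List.min?_mem hm2
          obtain ⟨u, hu, hueq⟩ := List.mem_map.1 hmmem
          obtain ⟨hug, hu1⟩ := mem_sharkCells.1 hu
          rw [← hueq]
          cases hv : vget v u.1 u.2
          · obtain ⟨e, he, heq⟩ := exists_queue_witness hInv hug hv
            have h3 : c ≤ e.2.2 := head_min hInv.ord (e0 := (x, y, c)) rfl e he
            have h4 := cheb_nonneg ((e.1, e.2.1) : Int × Int) u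
            omega
          · by_cases huq : u ∈ ((x, y, c) :: rest).map (fun e => ((e.1, e.2.1) : Int × Int))
            · obtain ⟨e, he, hee⟩ := List.mem_map.1 huq
              have hee' : ((e.1, e.2.1) : Int × Int) = u := hee
              have h5 := (hInv.ent e he).2.1
              have h3 : c ≤ e.2.2 := head_min hInv.ord (e0 := (x, y, c)) rfl e he
              rw [hee'] at h5
              omega
            · exact absurd hu1 (hInv.deq u hug hv huq).1
        omega
      · rw [if_neg h1]
        have hInv' := inv_step hInv h1
        have hmeas := expand_measure row col x y c moves v rest
        apply ihN
        · simp only [List.length_cons] at hm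
          omega
        · exact hInv'

theorem bfs_eq (arr : List (List Int)) (row col : Int) (x y : Int)
    (h : inGrid row col ((x, y) : Int × Int)) :
    bfs arr row col x y 0 =
      (PySem.List.min? ((sharkCells arr row col).map (fun t => cheb (x, y) t)) (fun z => z)).getD (-1) := by
  rw [bfs]
  apply bfsLoop_eq arr row col (x, y)
  constructor
  · intro e he
    rcases List.mem_cons.1 he with rfl | he'
    · exact ⟨h, (cheb_self _).symm, vget_vset_self _ _ _ h.1 h.2.2.1⟩
    · cases he'
  · simp
  · intro e0 he0 e he
    rw [List.head?_cons] at he0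
    obtain rfl := Option.some.inj he0
    rcases List.mem_cons.1 he with rfl | he'
    · simp
    · cases he'
  · intro c0 hc0 hv0 hnq
    exfalso
    apply hnq
    by_cases hxy : c0 = ((x, y) : Int × Int)
    · subst hxy
      exact List.mem_map.2 ⟨(x, y, 0), List.mem_cons_self, rfl⟩
    · rw [vget_vset_of_ne _ h.1 h.2.2.1 hc0.1 hc0.2.2.1 (by simpa using hxy)] at hv0
      rw [vget_blank hc0] at hv0
      cases hv0
  · intro u hu huv
    refine ⟨(x, y), h, vget_vset_self _ _ _ h.1 h.2.2.1, ?_⟩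
    rw [cheb_self]
    omega

-- ---- folding the grid ----
theorem foldl_inv_congr {α β : Type} (P : β → Prop) (f g : β → α → β) :
    ∀ (l : List α) (acc : β), P acc →
      (∀ b a, P b → a ∈ l → f b a = g b a ∧ P (f b a)) →
      l.foldl f acc = l.foldl g acc := by
  intro l
  induction l with
  | nil => intro acc _ _; rfl
  | cons a t ih =>
    intro acc hP h
    have h1 := h acc a hP (List.mem_cons_self)
    simp only [List.foldl_cons, h1.1]
    exact ih (g acc a) (h1.1 ▸ h1.2) (fun b a' hb ha' => h b a' hb (List.mem_cons_of_mem _ ha'))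

theorem foldl_inv_pres {α β : Type} (P : β → Prop) (f : β → α → β) :
    ∀ (l : List α) (acc : β), P acc → (∀ b a, P b → a ∈ l → P (f b a)) → P (l.foldl f acc) := by
  intro l
  induction l with
  | nil => intro acc h _; exact h
  | cons a t ih =>
    intro acc hP h
    exact ih (f acc a) (h acc a hP List.mem_cons_self)
      (fun b a' hb ha' => h b a' hb (List.mem_cons_of_mem _ ha'))

theorem cell_eq (arr : List (List Int)) (i j mx : Int)
    (hi : 0 ≤ i ∧ i < (arr.length : Int)) (hj : 0 ≤ j ∧ j < (arr.headI.length : Int))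
    (hmx : 0 ≤ mx) :
    (if get2 arr i j = 0 then
       (if mx < bfs arr (arr.length : Int) (arr.headI.length : Int) i j 0 then
          bfs arr (arr.length : Int) (arr.headI.length : Int) i j 0 else mx)
     else mx) =
    (if get2 arr i j = 0 ∧ sharkCells arr (arr.length : Int) (arr.headI.length : Int) ≠ [] then
       (if mx < (PySem.List.min? ((sharkCells arr (arr.length : Int) (arr.headI.length : Int)).map
             (fun t => cheb (i, j) t)) (fun z => z)).getD 0 then
          (PySem.List.min? ((sharkCells arr (arr.length : Int) (arr.headI.length : Int)).map
             (fun t => cheb (i, j) t)) (fun z => z)).getD 0 else mx)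
     else mx) := by
  by_cases h0 : get2 arr i j = 0
  · have hgrid : inGrid (arr.length : Int) (arr.headI.length : Int) ((i, j) : Int × Int) :=
      ⟨hi.1, hi.2, hj.1, hj.2⟩
    rw [bfs_eq arr _ _ i j hgrid]
    by_cases hsh : sharkCells arr (arr.length : Int) (arr.headI.length : Int) = []
    · rw [if_pos h0]
      rw [hsh, List.map_nil, (PySem.List.min?_eq_none_iff _ _).2 rfl]
      simp only [Option.getD_none]
      rw [if_neg (show ¬ mx < -1 by omega)]
      rw [if_neg (show ¬(get2 arr i j = 0 ∧ ([] : List (Int × Int)) ≠ []) by simp)]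
    · obtain ⟨m, hm⟩ : ∃ m, PySem.List.min?
          ((sharkCells arr (arr.length : Int) (arr.headI.length : Int)).map
            (fun t => cheb (i, j) t)) (fun z => z) = some m := by
        cases hmm : PySem.List.min?
            ((sharkCells arr (arr.length : Int) (arr.headI.length : Int)).map
              (fun t => cheb (i, j) t)) (fun z => z) with
        | none =>
          exact absurd (List.map_eq_nil_iff.1 ((PySem.List.min?_eq_none_iff _ _).1 hmm)) hsh
        | some mv => exact ⟨mv, rfl⟩
      rw [if_pos h0]
      rw [if_pos (show get2 arr i j = 0 ∧
        sharkCells arr (arr.length : Int) (arr.headI.length : Int) ≠ [] from ⟨h0, hsh⟩)]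
      rw [hm]
      simp only [Option.getD_some]
  · rw [if_neg h0, if_neg (fun hc => h0 hc.1)]

theorem cellB_nonneg (arr : List (List Int)) (i j mx : Int) (hmx : 0 ≤ mx) :
    0 ≤ (if get2 arr i j = 0 ∧ sharkCells arr (arr.length : Int) (arr.headI.length : Int) ≠ [] then
       (if mx < (PySem.List.min? ((sharkCells arr (arr.length : Int) (arr.headI.length : Int)).map
             (fun t => cheb (i, j) t)) (fun z => z)).getD 0 then
          (PySem.List.min? ((sharkCells arr (arr.length : Int) (arr.headI.length : Int)).map
             (fun t => cheb (i, j) t)) (fun z => z)).getD 0 else mx)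
     else mx) := by
  split
  · split <;> omega
  · exact hmx

theorem solution_eq (arr : List (List Int)) : solution arr = solution_alt arr := by
  unfold solution solution_alt
  apply foldl_inv_congr (fun mx : Int => 0 ≤ mx) _ _ _ _ le_rfl
  intro mx i hmx hi
  rw [PySem.List.mem_pyRange_one] at hi
  have hcell : ∀ (b j : Int), 0 ≤ b → j ∈ PySem.List.pyRange 0 (arr.headI.length : Int) 1 →
      (if get2 arr i j = 0 then
         (if b < bfs arr (arr.length : Int) (arr.headI.length : Int) i j 0 then
            bfs arr (arr.length : Int) (arr.headI.length : Int) i j 0 else b)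
       else b) =
      (if get2 arr i j = 0 ∧ sharkCells arr (arr.length : Int) (arr.headI.length : Int) ≠ [] then
         (if b < (PySem.List.min? ((sharkCells arr (arr.length : Int) (arr.headI.length : Int)).map
               (fun t => cheb (i, j) t)) (fun z => z)).getD 0 then
            (PySem.List.min? ((sharkCells arr (arr.length : Int) (arr.headI.length : Int)).map
               (fun t => cheb (i, j) t)) (fun z => z)).getD 0 else b)
       else b) := by
    intro b j hb hj
    rw [PySem.List.mem_pyRange_one] at hj
    exact cell_eq arr i j b hi hj hb
  constructor
  · apply foldl_inv_congr (fun mx : Int => 0 ≤ mx) _ _ _ _ hmx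
    intro b j hb hj
    refine ⟨hcell b j hb hj, ?_⟩
    rw [hcell b j hb hj]
    exact cellB_nonneg arr i j b hb
  · apply foldl_inv_pres (fun mx : Int => 0 ≤ mx) _ _ _ hmx
    intro b j hb hj
    rw [hcell b j hb hj]
    exact cellB_nonneg arr i j b hb

-- ===== VERDICT (by name: the statement is the Claim_ definition above) =====
theorem solution_spec : Claim_equal_solution := by
  intro arr _ _
  unfold Spec_solution
  exact solution_eq arr
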